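-- pv_equiv track=rewrite | github.com/josecerda1/Python | 3-7 letras sucesivas.py | precendencia_de_caracteres
-- ===== SOURCE A (Python) =====
-- def precendencia_de_caracteres(cadena, caracter_1, caracter_2):
--
--     contador=0
--     caracteres=""
--     bandera=False
--
--     for caracter in cadena:
--
--         if bandera==True and caracter==caracter_2:
--             contador+=1
--
--         bandera=False
--
--         if caracter==caracter_1 and bandera==False:
--             bandera=True
--
--     return contador
-- ===== SOURCE B (Python) =====
-- def precendencia_de_caracteres(cadena, caracter_1, caracter_2):
--     return sum(1 for a, b in zip(cadena, cadena[1:])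
--                if a == caracter_1 and b == caracter_2)
-- ===== Notes on version B (the rewrite author's own statement) =====
-- stated objective: simpler
-- what changed: Replaced the flag-carrying state machine with a stateless one-liner that counts adjacent pairs (a,b) with a==caracter_1 and b==caracter_2 over zip(cadena, cadena[1:]).
import Mathlib
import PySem

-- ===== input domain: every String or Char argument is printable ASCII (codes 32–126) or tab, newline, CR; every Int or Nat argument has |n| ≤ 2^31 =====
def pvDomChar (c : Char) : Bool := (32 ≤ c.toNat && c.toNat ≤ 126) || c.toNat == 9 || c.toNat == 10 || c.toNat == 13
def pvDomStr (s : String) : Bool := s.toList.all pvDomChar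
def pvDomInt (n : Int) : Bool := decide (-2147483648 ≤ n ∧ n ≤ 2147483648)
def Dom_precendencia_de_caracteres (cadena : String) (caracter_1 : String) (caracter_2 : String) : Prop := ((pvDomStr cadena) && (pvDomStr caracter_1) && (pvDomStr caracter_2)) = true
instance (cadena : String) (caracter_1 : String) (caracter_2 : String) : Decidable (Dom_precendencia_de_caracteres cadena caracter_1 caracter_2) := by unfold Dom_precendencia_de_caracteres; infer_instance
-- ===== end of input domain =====

-- B replaces A's flag-based state machine with a stateless count of adjacent
-- (caracter_1, caracter_2) pairs; simpler, same cost, same value everywhere.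

-- ===== PORT A =====
-- the for-loop over `cadena`, carrying (contador, bandera); char == string-arg
-- is Python's `caracter == caracter_i` (a 1-char string compared to the arg)
def pvLoopA (c1 c2 : String) : List Char → Int × Bool → Int × Bool
  | [], st => st
  | c :: rest, (contador, bandera) =>
      let contador := if bandera = true ∧ String.ofList [c] = c2 then contador + 1 else contador
      let bandera := false
      let bandera := if String.ofList [c] = c1 ∧ bandera = false then true else bandera
      pvLoopA c1 c2 rest (contador, bandera)

def precendencia_de_caracteres (cadena : String) (caracter_1 : String) (caracter_2 : String) : Int :=
  (pvLoopA caracter_1 caracter_2 cadena.toList (0, false)).1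

-- ===== PORT B =====
-- zip(cadena, cadena[1:]) and count the matching pairs
def precendencia_de_caracteres_alt (cadena : String) (caracter_1 : String) (caracter_2 : String) : Int :=
  ((cadena.toList.zip (PySem.List.slice cadena.toList (some 1) none)).filter
    (fun p => String.ofList [p.1] == caracter_1 && String.ofList [p.2] == caracter_2)).length

-- ===== PRECONDITION & SPEC =====
def Spec_precendencia_de_caracteres (cadena : String) (caracter_1 : String) (caracter_2 : String) (out : Int) : Prop := out = precendencia_de_caracteres_alt cadena caracter_1 caracter_2
instance (cadena : String) (caracter_1 : String) (caracter_2 : String) (out : Int) : Decidable (Spec_precendencia_de_caracteres cadena caracter_1 caracter_2 out) := by unfold Spec_precendencia_de_caracteres; infer_instance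

-- ===== CLAIM (what is proved, stated in full; the proofs are below) =====
def Claim_equal_precendencia_de_caracteres : Prop := ∀ (cadena : String) (caracter_1 : String) (caracter_2 : String), Dom_precendencia_de_caracteres cadena caracter_1 caracter_2 → Spec_precendencia_de_caracteres cadena caracter_1 caracter_2 (precendencia_de_caracteres cadena caracter_1 caracter_2)

-- ===== LEMMAS AND PROOFS =====

-- B's pair count on a plain list (slice [1:] of l is l.tail on these inputs)
def pairCount (c1 c2 : String) (l : List Char) : Int :=
  ((l.zip l.tail).filter (fun p => String.ofList [p.1] == c1 && String.ofList [p.2] == c2)).length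

lemma slice_one_eq_tail (l : List Char) : PySem.List.slice l (some 1) none = l.tail :=
  PySem.List.slice_from_one l

def headMatch (c2 : String) : List Char → Bool
  | [] => false
  | d :: _ => String.ofList [d] == c2

lemma pairCount_cons (c1 c2 : String) (c : Char) (t : List Char) :
    pairCount c1 c2 (c :: t) =
      (if String.ofList [c] == c1 && headMatch c2 t then 1 else 0) + pairCount c1 c2 t := by
  cases t with
  | nil => simp [pairCount, headMatch]
  | cons d t' =>
      simp only [pairCount, List.tail_cons, List.zip_cons_cons, List.filter_cons, headMatch]
      by_cases h1 : String.ofList [c] = c1 <;> by_cases h2 : String.ofList [d] = c2 <;>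
        simp [h1, h2, Int.add_comm]

-- loop invariant: the fold's counter is n plus (pending flag fires on the head) plus the pair count
lemma loopA_eq (c1 c2 : String) (l : List Char) :
    ∀ (n : Int) (b : Bool),
      (pvLoopA c1 c2 l (n, b)).1 =
        n + (if b && headMatch c2 l then 1 else 0) + pairCount c1 c2 l := by
  induction l with
  | nil => intro n b; simp [pvLoopA, pairCount, headMatch]
  | cons c t ih =>
      intro n b
      simp only [pvLoopA, headMatch]
      rw [ih, pairCount_cons]
      by_cases hb : b = true <;> by_cases h2 : String.ofList [c] = c2 <;>
        by_cases h1 : String.ofList [c] = c1 <;>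
          simp [hb, h1, h2] <;> split_ifs <;> omega

-- ===== VERDICT (by name: the statement is the Claim_ definition above) =====
theorem precendencia_de_caracteres_spec : Claim_equal_precendencia_de_caracteres := by
  intro cadena c1 c2 _
  show _ = _
  rw [precendencia_de_caracteres, precendencia_de_caracteres_alt, loopA_eq, slice_one_eq_tail]
  simp [pairCount]
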